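-- pv_equiv track=rewrite | github.com/mate-code/alfred | src/alfred3/element.py | _format_element_width
-- ===== SOURCE A (Python) =====
-- from typing import Tuple, List, Union
--
-- def _format_element_width(element_width: List[int]):
--     out = []
--
--     if not element_width:
--         out.append("col-12")
--         return out
--
--     for i, w in enumerate(element_width):
--         if i == 0:
--             out.append(f"col-{w}")
--         elif i == 1:
--             out.append(f"col-sm-{w}")
--         elif i == 2:
--             out.append(f"col-md-{w}")
--         elif i == 3:
--             out.append(f"col-lg-{w}")
--         elif i == 4:
--             out.append(f"col-xl-{w}")
--
--     return out
-- ===== SOURCE B (Python) =====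
-- def _format_element_width(element_width):
--     # Recursive descent consuming the widths together with a dwindling list of
--     # Bootstrap breakpoint infixes; the first width has no breakpoint, so the
--     # recursion starts before the breakpoint list is introduced. Output is
--     # built front-to-back by consing; an empty result falls back to ["col-12"].
--     def go(widths, bps):
--         if not widths:
--             return []
--         w, rest = widths[0], widths[1:]
--         if bps is None:
--             return ["col-%d" % w] + go(rest, ["sm", "md", "lg", "xl"])
--         if not bps:
--             return []
--         return ["col-%s-%d" % (bps[0], w)] + go(rest, bps[1:])
--     return go(element_width, None) or ["col-12"]
-- ===== Notes on version B (the rewrite author's own statement) =====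
-- stated objective: alternative
-- what changed: Replaces the indexed enumerate loop with an if/elif ladder by a recursive descent that consumes the widths together with a dwindling list of breakpoint infixes (first width has no breakpoint before the list is introduced), conses the output front-to-back, and gets the empty-input default via an or-fallback instead of an explicit guard.
import Mathlib
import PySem

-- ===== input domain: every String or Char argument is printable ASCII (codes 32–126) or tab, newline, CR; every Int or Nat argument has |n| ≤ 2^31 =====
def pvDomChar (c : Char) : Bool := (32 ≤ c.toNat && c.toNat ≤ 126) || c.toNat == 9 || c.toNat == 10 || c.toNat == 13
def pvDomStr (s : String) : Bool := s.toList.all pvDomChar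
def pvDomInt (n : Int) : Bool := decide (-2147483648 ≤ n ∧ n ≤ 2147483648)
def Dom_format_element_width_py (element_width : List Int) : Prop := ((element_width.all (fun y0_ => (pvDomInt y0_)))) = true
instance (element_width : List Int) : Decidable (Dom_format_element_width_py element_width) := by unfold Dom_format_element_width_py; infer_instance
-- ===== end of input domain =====

-- B replaces A's indexed if/elif enumerate loop by a recursive descent over widths and a
-- dwindling breakpoint-infix list, with the empty-input default as an or-fallback (alternative).

-- ===== PORT A =====
-- the 'for i, w in enumerate(element_width)' loop, carrying the index and the accumulator
def fewLoopA : List Int → Int → List String → List String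
  | [], _, out => out
  | w :: t, i, out =>
    let out :=
      if i = 0 then out ++ ["col-" ++ PySem.Int.toStr w]
      else if i = 1 then out ++ ["col-sm-" ++ PySem.Int.toStr w]
      else if i = 2 then out ++ ["col-md-" ++ PySem.Int.toStr w]
      else if i = 3 then out ++ ["col-lg-" ++ PySem.Int.toStr w]
      else if i = 4 then out ++ ["col-xl-" ++ PySem.Int.toStr w]
      else out
    fewLoopA t (i + 1) out

def format_element_width_py (element_width : List Int) : List String :=
  if element_width = [] then ["col-12"]
  else fewLoopA element_width 0 []

-- ===== PORT B =====
-- Source B's 'go': recursion on widths, breakpoint infixes appear after the first width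
def fewGo : List Int → Option (List String) → List String
  | [], _ => []
  | w :: rest, none => ("col-" ++ PySem.Int.toStr w) :: fewGo rest (some ["sm", "md", "lg", "xl"])
  | _ :: _, some [] => []
  | w :: rest, some (b :: bs) => ("col-" ++ b ++ "-" ++ PySem.Int.toStr w) :: fewGo rest (some bs)

def format_element_width_py_alt (element_width : List Int) : List String :=
  let r := fewGo element_width none
  if r = [] then ["col-12"] else r   -- Python's 'x or default'

-- ===== PRECONDITION & SPEC =====
def Spec_format_element_width_py (element_width : List Int) (out : List String) : Prop := out = format_element_width_py_alt element_width
instance (element_width : List Int) (out : List String) : Decidable (Spec_format_element_width_py element_width out) := by unfold Spec_format_element_width_py; infer_instance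

-- ===== CLAIM =====
def Claim_equal_format_element_width_py : Prop := ∀ (element_width : List Int), Dom_format_element_width_py element_width → Spec_format_element_width_py element_width (format_element_width_py element_width)

-- ===== LEMMAS AND PROOFS =====
theorem fewLoopA_ge5 (l : List Int) (i : Int) (out : List String) (h : 5 ≤ i) :
    fewLoopA l i out = out := by
  induction l generalizing i out with
  | nil => rfl
  | cons w t ih =>
      have h0 : ¬ i = 0 := by omega
      have h1 : ¬ i = 1 := by omega
      have h2 : ¬ i = 2 := by omega
      have h3 : ¬ i = 3 := by omega
      have h4 : ¬ i = 4 := by omega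
      simp [fewLoopA, h0, h1, h2, h3, h4]
      exact ih (i + 1) out (by omega)

theorem fewGo_empty_bps (l : List Int) : fewGo l (some []) = [] := by
  cases l <;> rfl


-- ===== VERDICT =====
theorem format_element_width_py_spec : Claim_equal_format_element_width_py := by
  intro l _
  unfold Spec_format_element_width_py format_element_width_py format_element_width_py_alt
  rcases l with _ | ⟨a, _ | ⟨b, _ | ⟨c, _ | ⟨d, _ | ⟨e, rest⟩⟩⟩⟩⟩ <;>
    simp [fewLoopA, fewGo, fewLoopA_ge5, fewGo_empty_bps]
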